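-- pv_equiv track=rewrite | github.com/ravi2007147/shivani-ai | src/utils/voice_input.py | _match_account
-- ===== SOURCE A (Python) =====
-- from typing import Dict, Optional, Any
--
-- def _match_account(account: Optional[str], available: list) -> Optional[str]:
--     """Match account to available list."""
--     if not account or not available:
--         return available[0] if available else None
--
--     account_lower = account.lower()
--
--     # Exact match
--     for acc in available:
--         if acc.lower() == account_lower:
--             return acc
--
--     # Partial match
--     for acc in available:
--         if account_lower in acc.lower() or acc.lower() in account_lower:
--             return acc
--
--     # Return first available if no match
--     return available[0] if available else None
-- ===== SOURCE B (Python) =====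
-- def _match_account(account, available):
--     """Match account to available list (single pass with first-partial accumulator)."""
--     if not account or not available:
--         return available[0] if available else None
--     account_lower = account.lower()
--     candidate = None
--     for acc in available:
--         acc_lower = acc.lower()
--         if acc_lower == account_lower:
--             return acc
--         if candidate is None and (account_lower in acc_lower or acc_lower in account_lower):
--             candidate = acc
--     return candidate if candidate is not None else available[0]
-- ===== Notes on version B (the rewrite author's own statement) =====
-- stated objective: alternative
-- what changed: A's two separate scans (exact-match pass, then partial-match pass) are merged into one loop that returns on an exact match and records only the first partial candidate, returned after the loop if no exact match exists.
import Mathlib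
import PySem

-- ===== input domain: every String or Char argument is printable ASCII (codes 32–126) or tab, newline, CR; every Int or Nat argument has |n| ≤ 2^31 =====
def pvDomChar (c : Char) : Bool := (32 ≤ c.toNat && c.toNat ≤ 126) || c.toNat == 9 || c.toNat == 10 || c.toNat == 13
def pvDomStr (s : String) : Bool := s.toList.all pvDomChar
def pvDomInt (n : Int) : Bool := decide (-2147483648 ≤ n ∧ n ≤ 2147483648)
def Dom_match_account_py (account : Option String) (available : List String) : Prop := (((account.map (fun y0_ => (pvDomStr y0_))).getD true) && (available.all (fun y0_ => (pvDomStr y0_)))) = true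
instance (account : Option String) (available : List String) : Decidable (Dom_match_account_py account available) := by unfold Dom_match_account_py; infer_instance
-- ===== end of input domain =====

-- B merges A's two scans (exact pass, then partial pass) into one loop that records the first partial candidate; same results, one traversal.


-- ===== PORT A =====
-- 'for … return' loops are ported as List.find?; the two passes stay separate, as in A.
def match_account_py (account : Option String) (available : List String) : Option String :=
  if account.getD "" == "" || available.isEmpty then
    available.head?
  else
    let account_lower := PySem.Str.lower (account.getD "")
    match available.find? (fun acc => PySem.Str.lower acc == account_lower) with
    | some acc => some acc
    | none =>
      match available.find? (fun acc =>
          PySem.Str.isIn account_lower (PySem.Str.lower acc) ||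
          PySem.Str.isIn (PySem.Str.lower acc) account_lower) with
      | some acc => some acc
      | none => available.head?

-- ===== PORT B =====
-- B's single loop: return on exact match, record the first partial candidate, fall back after the loop.
def match_account_py_alt_loop (account_lower : String) (dflt : Option String) :
    List String → Option String → Option String
  | [], cand => match cand with
    | some c => some c
    | none => dflt
  | acc :: rest, cand =>
    let acc_lower := PySem.Str.lower acc
    if acc_lower == account_lower then
      some acc
    else if cand.isNone &&
        (PySem.Str.isIn account_lower acc_lower || PySem.Str.isIn acc_lower account_lower) then
      match_account_py_alt_loop account_lower dflt rest (some acc)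
    else
      match_account_py_alt_loop account_lower dflt rest cand

def match_account_py_alt (account : Option String) (available : List String) : Option String :=
  if account.getD "" == "" || available.isEmpty then
    available.head?
  else
    match_account_py_alt_loop (PySem.Str.lower (account.getD "")) available.head? available none

-- ===== PRECONDITION & SPEC =====
def Spec_match_account_py (account : Option String) (available : List String) (out : Option String) : Prop := out = match_account_py_alt account available
instance (account : Option String) (available : List String) (out : Option String) : Decidable (Spec_match_account_py account available out) := by unfold Spec_match_account_py; infer_instance

-- ===== CLAIM (what is proved, stated in full; the proofs are below) =====
def Claim_equal_match_account_py : Prop := ∀ (account : Option String) (available : List String), Dom_match_account_py account available → Spec_match_account_py account available (match_account_py account available)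

-- ===== LEMMAS AND PROOFS =====
-- Invariant of B's loop: it equals "first exact match, else the recorded candidate, else the first
-- partial match of the remaining list, else the default".
theorem match_account_py_alt_loop_eq (al : String) (dflt : Option String)
    (l : List String) (cand : Option String) :
    match_account_py_alt_loop al dflt l cand =
      match l.find? (fun acc => PySem.Str.lower acc == al) with
      | some acc => some acc
      | none =>
        match cand with
        | some c => some c
        | none =>
          match l.find? (fun acc =>
              PySem.Str.isIn al (PySem.Str.lower acc) ||
              PySem.Str.isIn (PySem.Str.lower acc) al) with
          | some acc => some acc
          | none => dflt := by
  induction l generalizing cand with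
  | nil => cases cand <;> simp [match_account_py_alt_loop]
  | cons a rest ih =>
    rw [match_account_py_alt_loop]
    by_cases hex : (PySem.Str.lower a == al) = true
    · simp [List.find?, hex]
    · rw [if_neg hex]
      cases hpp : (PySem.Str.isIn al (PySem.Str.lower a) ||
          PySem.Str.isIn (PySem.Str.lower a) al) with
      | true =>
        cases cand with
        | none =>
          rw [if_pos (by simp), ih]
          simp only [PySem.Str.isIn_eq, PySem.Str.toList_lower] at hpp
          simp [List.find?, hex, hpp]
        | some c =>
          rw [if_neg (by simp), ih]
          simp [List.find?, hex]
      | false =>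
        cases cand with
        | none =>
          rw [if_neg (by simp), ih]
          simp only [PySem.Str.isIn_eq, PySem.Str.toList_lower] at hpp
          simp [List.find?, hex, hpp]
        | some c =>
          rw [if_neg (by simp), ih]
          simp [List.find?, hex]

-- ===== VERDICT (by name: the statement is the Claim_ definition above) =====
theorem match_account_py_spec : Claim_equal_match_account_py := by
  intro account available _
  unfold Spec_match_account_py match_account_py match_account_py_alt
  split
  · rfl
  · rw [match_account_py_alt_loop_eq]
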